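-- pv_equiv track=rewrite | github.com/iitd-plos/superopt-tests | misc/bclink.py | remove_flags
-- ===== SOURCE A (Python) =====
-- def remove_flags(inlist):
--   outlist = []
--   expectingOutputFile = False
--   outputFile = ''
--   for e in inlist:
--     if not e.startswith("-") or e == "-o":
--       outlist.append(e)
--     if expectingOutputFile:
--       outputFile = e
--     if (e == "-o"):
--       expectingOutputFile = True
--     else:
--       expectingOutputFile = False
--   return (outlist, outputFile)
-- ===== SOURCE B (Python) =====
-- def remove_flags(inlist):
--   outlist = [e for e in inlist if not e.startswith("-") or e == "-o"]
--   outputFile = ''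
--   for i in range(len(inlist) - 2, -1, -1):
--     if inlist[i] == "-o":
--       outputFile = inlist[i + 1]
--       break
--   return (outlist, outputFile)
-- ===== Notes on version B (the rewrite author's own statement) =====
-- stated objective: alternative
-- what changed: Replaces A's single forward loop carrying an expectingOutputFile boolean state machine with two separate passes: a filter comprehension for outlist, and a backward index scan with early exit that finds the first '-o' from the right and takes its successor (last-match-forward = first-match-backward).
import Mathlib
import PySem

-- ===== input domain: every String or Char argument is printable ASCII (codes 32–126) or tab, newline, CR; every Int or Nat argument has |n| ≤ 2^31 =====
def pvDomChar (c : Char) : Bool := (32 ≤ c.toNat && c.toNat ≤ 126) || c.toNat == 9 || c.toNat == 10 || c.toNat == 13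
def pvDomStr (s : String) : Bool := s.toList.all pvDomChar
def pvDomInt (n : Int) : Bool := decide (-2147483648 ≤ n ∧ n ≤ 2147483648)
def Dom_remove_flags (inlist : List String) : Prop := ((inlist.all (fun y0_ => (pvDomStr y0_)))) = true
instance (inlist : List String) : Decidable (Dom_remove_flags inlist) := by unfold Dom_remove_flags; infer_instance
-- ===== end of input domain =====

-- B replaces A's single forward loop with an expectingOutputFile boolean state machine by two
-- separate passes: a filter for outlist and a backward index scan with early exit that finds
-- the first '-o' from the right and takes its successor (objective: alternative).


-- ===== PORT A =====
-- literal transliteration of A: one loop over inlist carrying (outlist, expectingOutputFile, outputFile)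
def remove_flags (inlist : List String) : List String × String :=
  let st := inlist.foldl
    (fun (s : List String × Bool × String) e =>
      let outlist := if !(PySem.Str.startswith e "-") || e == "-o" then s.1 ++ [e] else s.1
      let outputFile := if s.2.1 then e else s.2.2
      let expecting := e == "-o"
      (outlist, expecting, outputFile))
    ([], false, "")
  (st.1, st.2.2)

-- ===== PORT B =====
-- pvBack l n scans indices n-1, n-2, …, 0, returning l[i+1] at the first i with l[i] = "-o";
-- this is Source B's 'for i in range(len-2, -1, -1): … break' loop (called with n = len-1).
-- Indices i and i+1 are always in range at every call, so getD's default is never used.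
def pvBack (l : List String) : Nat → String
  | 0 => ""
  | n+1 => if (l[n]?.getD "") == "-o" then l[n+1]?.getD "" else pvBack l n

-- literal transliteration of B: filter comprehension + backward early-exit index scan
def remove_flags_alt (inlist : List String) : List String × String :=
  (inlist.filter (fun e => !(PySem.Str.startswith e "-") || e == "-o"),
   pvBack inlist (inlist.length - 1))

-- ===== PRECONDITION & SPEC =====
def Spec_remove_flags (inlist : List String) (out : List String × String) : Prop := out = remove_flags_alt inlist
instance (inlist : List String) (out : List String × String) : Decidable (Spec_remove_flags inlist out) := by unfold Spec_remove_flags; infer_instance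

-- ===== CLAIM (what is proved, stated in full; the proofs are below) =====
def Claim_equal_remove_flags : Prop := ∀ (inlist : List String), Dom_remove_flags inlist → Spec_remove_flags inlist (remove_flags inlist)

-- ===== LEMMAS AND PROOFS =====

def pvStepA (s : List String × Bool × String) (e : String) : List String × Bool × String :=
  (if !(PySem.Str.startswith e "-") || e == "-o" then s.1 ++ [e] else s.1,
   e == "-o", if s.2.1 then e else s.2.2)

def pvG (a : String) (p : String × String) : String := if p.1 == "-o" then p.2 else a

theorem pvFoldA_eq (l : List String) (s : List String × Bool × String) :
    l.foldl (fun (s : List String × Bool × String) e =>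
      let outlist := if !(PySem.Str.startswith e "-") || e == "-o" then s.1 ++ [e] else s.1
      let outputFile := if s.2.1 then e else s.2.2
      let expecting := e == "-o"
      (outlist, expecting, outputFile)) s = l.foldl pvStepA s := rfl

theorem pvFst_foldA (l : List String) (acc : List String) (exp : Bool) (out : String) :
    (l.foldl pvStepA (acc, exp, out)).1
      = acc ++ l.filter (fun e => !(PySem.Str.startswith e "-") || e == "-o") := by
  induction l generalizing acc exp out with
  | nil => simp
  | cons x xs ih =>
    simp only [List.foldl_cons, pvStepA, List.filter_cons]
    rw [ih]
    cases h : (!(PySem.Str.startswith x "-") || x == "-o") with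
    | false => simp
    | true => simp

theorem pvSnd_foldA (l : List String) (acc : List String) (prev : String) (out : String) :
    (l.foldl pvStepA (acc, prev == "-o", out)).2.2
      = ((prev :: l).zip l).foldl pvG out := by
  induction l generalizing acc prev out with
  | nil => simp
  | cons x xs ih =>
    simp only [List.foldl_cons, pvStepA, List.zip_cons_cons]
    rw [ih]; rfl

theorem pvBack_eq_foldl (l : List String) (n : Nat) (h : n + 1 ≤ l.length) :
    pvBack l n = ((l.zip (l.drop 1)).take n).foldl pvG "" := by
  induction n with
  | zero => rfl
  | succ m ih =>
    have hm : m + 1 ≤ l.length := Nat.le_of_succ_le h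
    have hz : m < (l.zip (l.drop 1)).length := by
      simp [List.length_zip]; omega
    have hgm : m < l.length := by omega
    have hgm1 : m + 1 < l.length := by omega
    rw [pvBack, ih hm, List.take_add_one]
    have hget : (l.zip (l.drop 1))[m]? = some (l[m], l[m+1]) := by
      rw [List.getElem?_eq_getElem hz, List.getElem_zip]
      congr 2
      rw [List.getElem_drop]
      congr 1
      omega
    rw [hget]
    simp only [Option.toList_some, List.foldl_append, List.foldl_cons, List.foldl_nil, pvG]
    rw [List.getElem?_eq_getElem hgm, List.getElem?_eq_getElem hgm1]
    rfl

-- ===== VERDICT (by name: the statement is the Claim_ definition above) =====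
theorem remove_flags_spec : Claim_equal_remove_flags := by
  intro inlist _
  show remove_flags inlist = remove_flags_alt inlist
  unfold remove_flags remove_flags_alt
  rw [pvFoldA_eq]
  refine Prod.ext ?_ ?_
  · simpa using pvFst_foldA inlist [] false ""
  · show (inlist.foldl pvStepA ([], false, "")).2.2 = pvBack inlist (inlist.length - 1)
    have hb : false = ("" == "-o") := by decide
    rw [hb, pvSnd_foldA]
    cases inlist with
    | nil => rfl
    | cons x xs =>
      rw [List.zip_cons_cons, List.foldl_cons]
      have h1 : pvG "" ("", x) = "" := by simp [pvG]
      rw [h1]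
      have h2 : (x :: xs).length - 1 = xs.length := by simp
      rw [h2, pvBack_eq_foldl (x :: xs) xs.length (by simp)]
      have h3 : (((x :: xs).zip ((x :: xs).drop 1)).take xs.length)
          = (x :: xs).zip xs := by
        rw [List.drop_one, List.tail_cons, List.take_of_length_le]
        simp [List.length_zip]
      rw [h3]
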